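-- pv_equiv track=rewrite | github.com/vntsvetkov/tensor_authotest | Webinar5/task_3.py | everything_for_your_cat
-- ===== SOURCE A (Python) =====
-- def everything_for_your_cat(cats_data):
--     '''
--     Функция, которая принимает список кортежей с данными о котах и покупателях и объединяет их в одну строку
--     :param cats_data: Данные о кошках и их владельцах, записанные списком кортежей
--     :return: строка в формате Имя_покупателя Фамилия_покупателя: Кличка_котика1, Возраст; ...; Кличка_котикаN, Возраст\n
--     '''
--     cats_data_dict = {}
--     for info in cats_data:
--         key = info[2] + " " + info[3]
--         value = info[0] + ", " + str(info[1])
--         if key in cats_data_dict: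
--             cats_data_dict[key] += "; " + value
--         else:
--             cats_data_dict[key] = value
--     our_str = "".join([f'{key}: {value}\n' for key, value in cats_data_dict.items()])
--     return our_str
-- ===== SOURCE B (Python) =====
-- def everything_for_your_cat(cats_data):
--     # Two staged passes, no dict: collect owner keys in first-occurrence order,
--     # then for each owner scan the list and render the line by filtering.
--     owners = []
--     for _, _, oname, osurname in cats_data:
--         key = oname + " " + osurname
--         if key not in owners:
--             owners.append(key)
--     return "".join(
--         key + ": " + "; ".join(name + ", " + str(age)
--                                for name, age, o, s in cats_data if o + " " + s == key) + "\n"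
--         for key in owners)
-- ===== Notes on version B (the rewrite author's own statement) =====
-- stated objective: alternative
-- what changed: Drops the dict aggregation entirely: B first collects owner keys in first-occurrence order into a plain list, then renders each owner's line by re-scanning and filtering the input per key (group-by-filter nested scans instead of hash aggregation).
import Mathlib
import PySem

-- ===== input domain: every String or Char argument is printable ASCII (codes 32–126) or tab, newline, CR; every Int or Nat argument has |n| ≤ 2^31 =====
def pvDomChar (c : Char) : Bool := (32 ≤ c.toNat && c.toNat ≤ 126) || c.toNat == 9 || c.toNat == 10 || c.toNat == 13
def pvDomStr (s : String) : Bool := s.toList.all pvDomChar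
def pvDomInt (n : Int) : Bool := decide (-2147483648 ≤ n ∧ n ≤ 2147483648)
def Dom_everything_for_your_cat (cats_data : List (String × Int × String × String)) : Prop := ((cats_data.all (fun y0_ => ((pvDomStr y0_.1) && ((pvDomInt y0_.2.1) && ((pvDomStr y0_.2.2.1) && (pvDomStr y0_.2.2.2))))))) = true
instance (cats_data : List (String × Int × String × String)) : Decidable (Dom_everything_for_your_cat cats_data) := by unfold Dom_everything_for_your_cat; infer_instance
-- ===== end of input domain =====

-- B replaces A's dict aggregation by two staged passes with no dict at all:
-- collect owner keys in first-occurrence order, then render each owner's line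
-- by filtering the input list per key (group-by-filter; alternative, not faster).

-- shared one-line helpers (the key and value expressions both sources write inline)
def pvKey (info : String × Int × String × String) : String := info.2.2.1 ++ " " ++ info.2.2.2
def pvVal (info : String × Int × String × String) : String := info.1 ++ ", " ++ PySem.Int.toStr info.2.1

-- ===== PORT A =====
def everything_for_your_cat (cats_data : List (String × Int × String × String)) : String :=
  let cats_data_dict := cats_data.foldl (fun d info =>
    let key := pvKey info
    let value := pvVal info
    if d.contains key then d.insert key (d.getD key "" ++ ("; " ++ value))
    else d.insert key value) PySem.Dict.empty
  PySem.Str.join "" (cats_data_dict.items.map (fun p => p.1 ++ ": " ++ p.2 ++ "\n"))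

-- ===== PORT B =====
def everything_for_your_cat_alt (cats_data : List (String × Int × String × String)) : String :=
  let owners := cats_data.foldl (fun ow info =>
    let key := pvKey info
    if key ∈ ow then ow else ow ++ [key]) []
  PySem.Str.join "" (owners.map (fun key =>
    key ++ ": " ++
      PySem.Str.join "; " ((cats_data.filter (fun q => pvKey q == key)).map pvVal) ++ "\n"))

-- ===== PRECONDITION & SPEC =====
def Spec_everything_for_your_cat (cats_data : List (String × Int × String × String)) (out : String) : Prop := out = everything_for_your_cat_alt cats_data
instance (cats_data : List (String × Int × String × String)) (out : String) : Decidable (Spec_everything_for_your_cat cats_data out) := by unfold Spec_everything_for_your_cat; infer_instance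

-- ===== CLAIM (what is proved, stated in full; the proofs are below) =====
def Claim_equal_everything_for_your_cat : Prop := ∀ (cats_data : List (String × Int × String × String)), Dom_everything_for_your_cat cats_data → Spec_everything_for_your_cat cats_data (everything_for_your_cat cats_data)

-- ===== LEMMAS AND PROOFS =====

-- "; ".join over a list grown by one element, when the list is nonempty.
theorem chars_join_append_singleton (sep : List Char) (xs : List (List Char)) (x : List Char)
    (h : xs ≠ []) :
    PySem.Chars.join sep (xs ++ [x]) = PySem.Chars.join sep xs ++ sep ++ x := by
  induction xs with
  | nil => exact absurd rfl h
  | cons a t ih =>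
    cases t with
    | nil => simp [PySem.Chars.join, List.intercalate, List.intersperse]
    | cons b r =>
      have := ih (by simp)
      simp only [List.cons_append, PySem.Chars.join_cons_cons] at *
      simp [this, List.append_assoc]

theorem str_join_append_singleton (sep : String) (xs : List String) (x : String)
    (h : xs ≠ []) :
    PySem.Str.join sep (xs ++ [x]) = PySem.Str.join sep xs ++ sep ++ x := by
  apply String.toList_injective
  simp only [PySem.Str.toList_join, String.toList_append, List.map_append, List.map_cons,
    List.map_nil]
  exact chars_join_append_singleton _ _ _ (by simpa using h)

theorem str_join_singleton (sep : String) (x : String) :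
    PySem.Str.join sep [x] = x := by
  apply String.toList_injective
  simp [PySem.Str.toList_join, PySem.Chars.join_singleton]

-- first-occurrence deduplication of a list of keys
def pvFirstKeys : List String → List String
  | [] => []
  | k :: t => k :: (pvFirstKeys t).filter (fun x => !(x == k))

theorem mem_pvFirstKeys (x : String) (m : List String) : x ∈ pvFirstKeys m ↔ x ∈ m := by
  induction m with
  | nil => simp [pvFirstKeys]
  | cons a t ih =>
    by_cases hx : x = a
    · simp [pvFirstKeys, hx]
    · simp [pvFirstKeys, hx, List.mem_filter, ih]

theorem nodup_pvFirstKeys (m : List String) : (pvFirstKeys m).Nodup := by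
  induction m with
  | nil => simp [pvFirstKeys]
  | cons a t ih =>
    refine List.Nodup.cons ?_ (ih.filter _)
    intro hmem
    have := (List.mem_filter.mp hmem).2
    simp at this

theorem pvFirstKeys_append_singleton (m : List String) (k : String) :
    pvFirstKeys (m ++ [k]) = if k ∈ m then pvFirstKeys m else pvFirstKeys m ++ [k] := by
  induction m with
  | nil => simp [pvFirstKeys]
  | cons a t ih =>
    by_cases hk : k = a
    · subst hk
      by_cases hkt : k ∈ t <;>
        simp [pvFirstKeys, ih, hkt, List.filter_append, pvFirstKeys]
    · by_cases hkt : k ∈ t <;>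
        simp [pvFirstKeys, ih, hkt, hk, List.filter_append]

-- the joined value string for one owner key
def pvJoinVals (l : List (String × Int × String × String)) (k : String) : String :=
  PySem.Str.join "; " ((l.filter (fun q => pvKey q == k)).map pvVal)

-- the canonical grouped items both programs compute
def pvSpecItems (l : List (String × Int × String × String)) : List (String × String) :=
  (pvFirstKeys (l.map pvKey)).map (fun k => (k, pvJoinVals l k))

theorem pvJoinVals_append (l : List (String × Int × String × String))
    (x : String × Int × String × String) (k : String) :
    pvJoinVals (l ++ [x]) k =
      if pvKey x = k then
        (if pvKey x ∈ l.map pvKey then pvJoinVals l k ++ "; " ++ pvVal x else pvVal x)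
      else pvJoinVals l k := by
  unfold pvJoinVals
  rw [List.filter_append]
  by_cases hk : pvKey x = k
  · subst hk
    rw [if_pos rfl]
    simp only [List.filter_cons, List.filter_nil, beq_self_eq_true, if_pos]
    by_cases hmem : pvKey x ∈ l.map pvKey
    · rw [if_pos hmem, List.map_append, List.map_cons, List.map_nil]
      apply str_join_append_singleton
      obtain ⟨q, hq, hqk⟩ := List.mem_map.mp hmem
      have hq' : q ∈ l.filter (fun q' => pvKey q' == pvKey x) :=
        List.mem_filter.mpr ⟨hq, by simp [hqk]⟩
      intro hnil
      rw [List.map_eq_nil_iff] at hnil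
      rw [hnil] at hq'
      simp at hq'
    · have hfil : l.filter (fun q => pvKey q == pvKey x) = [] := by
        rw [List.filter_eq_nil_iff]
        intro q hq hqk
        exact hmem (List.mem_map.mpr ⟨q, hq, by simpa using hqk⟩)
      rw [if_neg hmem, hfil]
      simp [str_join_singleton]
  · rw [if_neg hk]
    have : List.filter (fun q => pvKey q == k) [x] = [] := by simp [hk]
    simp [this]

-- the two loop bodies, named for the proofs
def pvStepA (d : PySem.Dict String String) (info : String × Int × String × String) :
    PySem.Dict String String :=
  let key := pvKey info
  let value := pvVal info
  if d.contains key then d.insert key (d.getD key "" ++ ("; " ++ value))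
  else d.insert key value

def pvStepOw (ow : List String) (info : String × Int × String × String) : List String :=
  let key := pvKey info
  if key ∈ ow then ow else ow ++ [key]

-- B's first pass computes exactly the first-occurrence key list
theorem foldOw_eq (l : List (String × Int × String × String)) :
    l.foldl pvStepOw [] = pvFirstKeys (l.map pvKey) := by
  induction l using List.reverseRecOn with
  | nil => simp [pvFirstKeys]
  | append_singleton t x ih =>
    rw [List.foldl_append, List.foldl_cons, List.foldl_nil, ih, List.map_append,
      List.map_cons, List.map_nil, pvFirstKeys_append_singleton]
    show (if pvKey x ∈ pvFirstKeys (t.map pvKey) then pvFirstKeys (t.map pvKey)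
        else pvFirstKeys (t.map pvKey) ++ [pvKey x]) = _
    by_cases hmem : pvKey x ∈ t.map pvKey
    · rw [if_pos ((mem_pvFirstKeys _ _).mpr hmem), if_pos hmem]
    · rw [if_neg (fun h => hmem ((mem_pvFirstKeys _ _).mp h)), if_neg hmem]

-- A's dict, after the whole fold, holds exactly the canonical grouped items
theorem foldA_items (l : List (String × Int × String × String)) :
    (l.foldl pvStepA PySem.Dict.empty).items = pvSpecItems l := by
  induction l using List.reverseRecOn with
  | nil => rfl
  | append_singleton t x ih =>
    rw [List.foldl_append, List.foldl_cons, List.foldl_nil]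
    set D := t.foldl pvStepA PySem.Dict.empty with hD
    have hkeys : D.keys = pvFirstKeys (t.map pvKey) := by
      show (D.items.map Prod.fst) = _
      rw [ih]; unfold pvSpecItems; rw [List.map_map]; exact List.map_congr_left (fun a _ => rfl) |>.trans (List.map_id _)
    have hnd : D.keys.Nodup := by
      rw [hkeys]; exact nodup_pvFirstKeys _
    have hc : D.contains (pvKey x) = decide (pvKey x ∈ t.map pvKey) := by
      rw [PySem.Dict.contains_eq_decide_mem_keys, hkeys]
      by_cases h : pvKey x ∈ t.map pvKey <;> simp [h, mem_pvFirstKeys]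
    rw [show pvStepA D x = (if D.contains (pvKey x) then
          D.insert (pvKey x) (D.getD (pvKey x) "" ++ ("; " ++ pvVal x))
        else D.insert (pvKey x) (pvVal x)) from rfl]
    by_cases hmem : pvKey x ∈ t.map pvKey
    · have hct : D.contains (pvKey x) = true := by simp [hc, hmem]
      rw [if_pos hct, PySem.Dict.items_insert_of_contains _ _ hct, ih]
      have hget : D.getD (pvKey x) "" = pvJoinVals t (pvKey x) := by
        apply PySem.Dict.getD_of_mem_items _ _ hnd
        rw [ih]
        exact List.mem_map_of_mem ((mem_pvFirstKeys _ _).mpr hmem)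
      rw [hget]
      unfold pvSpecItems
      rw [List.map_append, List.map_cons, List.map_nil, pvFirstKeys_append_singleton,
        if_pos hmem, List.map_map]
      apply List.map_congr_left
      intro k hkmem
      by_cases hkk : k = pvKey x
      · subst hkk
        simp only [Function.comp, beq_self_eq_true, if_pos]
        rw [pvJoinVals_append, if_pos rfl, if_pos hmem]
        simp [String.append_assoc]
      · simp only [Function.comp]
        rw [if_neg (by simpa using hkk),
          pvJoinVals_append, if_neg (fun h => hkk h.symm)]
    · have hct : D.contains (pvKey x) = false := by simp [hc, hmem]
      rw [if_neg (by simp [hct]), PySem.Dict.items_insert_of_not_contains _ _ hct, ih]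
      unfold pvSpecItems
      rw [List.map_append, List.map_cons, List.map_nil, pvFirstKeys_append_singleton,
        if_neg hmem, List.map_append]
      congr 1
      · apply List.map_congr_left
        intro k hkmem
        have hkk : k ≠ pvKey x := fun h => hmem ((mem_pvFirstKeys _ _).mp (h ▸ hkmem))
        rw [pvJoinVals_append, if_neg (fun h => hkk h.symm)]
      · simp only [List.map_cons, List.map_nil]
        rw [pvJoinVals_append, if_pos rfl, if_neg hmem]

-- ===== VERDICT (by name: the statement is the Claim_ definition above) =====
theorem everything_for_your_cat_spec : Claim_equal_everything_for_your_cat := by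
  intro cats_data _
  show everything_for_your_cat cats_data = everything_for_your_cat_alt cats_data
  unfold everything_for_your_cat everything_for_your_cat_alt
  show PySem.Str.join "" ((cats_data.foldl pvStepA PySem.Dict.empty).items.map _)
      = PySem.Str.join "" ((cats_data.foldl pvStepOw []).map _)
  rw [foldA_items, foldOw_eq]
  unfold pvSpecItems
  rw [List.map_map]
  rfl
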